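-- pv_equiv track=rewrite | github.com/Alljoined/alljoined-dataset1 | 1_preprocessing/scripts/divide_train_test.py | organize_by_supercategory
-- ===== SOURCE A (Python) =====
-- from collections import defaultdict
--
-- def organize_by_supercategory(data):
--     supercategory_images = defaultdict(set)
--     image_supercategories = defaultdict(set)
--     for index, item in enumerate(data):
--         for category in item['categories']:
--             supercategory = category['supercategory_name']
--             supercategory_images[supercategory].add(index)
--             image_supercategories[index].add(supercategory)
--     return supercategory_images, image_supercategories
-- ===== SOURCE B (Python) =====
-- from collections import defaultdict
--
-- def organize_by_supercategory(data):
--     # Two-stage decomposition: first build only the image->supercategories map,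
--     # then invert that (already de-duplicated) map to get supercategory->images.
--     image_supercategories = defaultdict(set)
--     for index, item in enumerate(data):
--         for category in item['categories']:
--             image_supercategories[index].add(category['supercategory_name'])
--     supercategory_images = defaultdict(set)
--     for index, names in image_supercategories.items():
--         for name in names:
--             supercategory_images[name].add(index)
--     return supercategory_images, image_supercategories
-- ===== Notes on version B (the rewrite author's own statement) =====
-- stated objective: alternative
-- what changed: Instead of A's single nested loop filling both mappings at once, B builds only image_supercategories from the data, then obtains supercategory_images by inverting that already de-duplicated map in a second pass over its items.
import Mathlib
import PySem

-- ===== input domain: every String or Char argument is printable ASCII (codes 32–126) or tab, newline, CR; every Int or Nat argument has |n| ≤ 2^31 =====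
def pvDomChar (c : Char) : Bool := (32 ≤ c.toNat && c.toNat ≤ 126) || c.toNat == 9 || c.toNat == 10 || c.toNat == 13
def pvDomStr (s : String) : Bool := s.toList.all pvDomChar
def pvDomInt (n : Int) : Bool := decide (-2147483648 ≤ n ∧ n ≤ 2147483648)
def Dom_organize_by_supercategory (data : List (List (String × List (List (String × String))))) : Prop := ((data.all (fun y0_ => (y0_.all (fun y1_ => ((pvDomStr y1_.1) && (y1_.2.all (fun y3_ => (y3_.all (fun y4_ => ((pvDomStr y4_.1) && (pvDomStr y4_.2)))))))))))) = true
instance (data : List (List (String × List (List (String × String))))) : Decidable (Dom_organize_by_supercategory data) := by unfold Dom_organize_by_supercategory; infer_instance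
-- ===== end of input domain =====

-- B decomposes the task into two stages: a first pass builds only image_supercategories from the
-- data, and a second pass inverts that already de-duplicated map to get supercategory_images.

-- ===== PORT A =====
-- literal port of A: one loop over enumerate(data), inner loop over item['categories'],
-- updating both defaultdict(set)s in the same step. getD with defaults is valid under Pre_
-- (which guarantees the keys are present, so the Python does not raise KeyError).
def organize_by_supercategory (data : List (List (String × List (List (String × String))))) : (List (String × List Int)) × (List (Int × List String)) :=
  let st :=
    (PySem.List.enumerate data).foldl
      (fun (st : PySem.Dict String (PySem.Set Int) × PySem.Dict Int (PySem.Set String)) p =>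
        ((PySem.Dict.mk p.2).getD "categories" []).foldl
          (fun st category =>
            let supercategory := (PySem.Dict.mk category).getD "supercategory_name" ""
            (st.1.modify supercategory [] (fun s => PySem.Set.add s p.1),
             st.2.modify p.1 [] (fun s => PySem.Set.add s supercategory)))
          st)
      (PySem.Dict.empty, PySem.Dict.empty)
  (st.1.items, st.2.items)

-- ===== PORT B =====
-- literal port of Source B: pass 1 builds image_supercategories only; pass 2 loops over its
-- .items() and inverts it. (Python iterates each value set in hash order; only the key order
-- of supercategory_images can depend on it, and dicts are compared ignoring order. The port
-- iterates sets in first-insertion order.)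
def organize_by_supercategory_alt (data : List (List (String × List (List (String × String))))) : (List (String × List Int)) × (List (Int × List String)) :=
  let image_supercategories :=
    (PySem.List.enumerate data).foldl
      (fun (d : PySem.Dict Int (PySem.Set String)) p =>
        ((PySem.Dict.mk p.2).getD "categories" []).foldl
          (fun d category =>
            d.modify p.1 [] (fun s => PySem.Set.add s ((PySem.Dict.mk category).getD "supercategory_name" "")))
          d)
      PySem.Dict.empty
  let supercategory_images :=
    image_supercategories.items.foldl
      (fun (d : PySem.Dict String (PySem.Set Int)) q =>
        q.2.foldl (fun d name => d.modify name [] (fun s => PySem.Set.add s q.1)) d)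
      PySem.Dict.empty
  (supercategory_images.items, image_supercategories.items)

-- ===== PRECONDITION & SPEC =====
-- Pre_ excludes exactly the inputs where Python A raises KeyError: an item without the key
-- 'categories', or a category dict without the key 'supercategory_name'.
def Pre_organize_by_supercategory (data : List (List (String × List (List (String × String))))) : Prop :=
  (data.all (fun item =>
    (PySem.Dict.mk item).contains "categories" &&
    ((PySem.Dict.mk item).getD "categories" []).all (fun category =>
      (PySem.Dict.mk category).contains "supercategory_name"))) = true
instance (data : List (List (String × List (List (String × String))))) : Decidable (Pre_organize_by_supercategory data) := by unfold Pre_organize_by_supercategory; infer_instance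

def pvWitness_organize_by_supercategory : (List (List (String × List (List (String × String))))) :=
  [[("categories", [[("supercategory_name", "animal")], [("supercategory_name", "food")]])],
   [("categories", [])],
   [("categories", [[("supercategory_name", "animal")]])]]

def Spec_organize_by_supercategory (data : List (List (String × List (List (String × String))))) (out : (List (String × List Int)) × (List (Int × List String))) : Prop := out = organize_by_supercategory_alt data
instance (data : List (List (String × List (List (String × String))))) (out : (List (String × List Int)) × (List (Int × List String))) : Decidable (Spec_organize_by_supercategory data out) := by unfold Spec_organize_by_supercategory; infer_instance

-- ===== CLAIM (what is proved, stated in full; the proofs are below) =====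
def Claim_equal_organize_by_supercategory : Prop := ∀ (data : List (List (String × List (List (String × String))))), Dom_organize_by_supercategory data → Pre_organize_by_supercategory data → Spec_organize_by_supercategory data (organize_by_supercategory data)

-- ===== LEMMAS AND PROOFS =====

-- names of one item's categories
def pvNames (p : Int × List (String × List (List (String × String)))) : Int × List String :=
  (p.1, ((PySem.Dict.mk p.2).getD "categories" []).map
          (fun category => (PySem.Dict.mk category).getD "supercategory_name" ""))

-- the inversion step (add index q.1 under every name of q.2)
def istep (d : PySem.Dict String (PySem.Set Int)) (q : Int × List String) : PySem.Dict String (PySem.Set Int) :=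
  q.2.foldl (fun d n => d.modify n [] (fun s => PySem.Set.add s q.1)) d

-- the grouping step (add every name of q.2 to the set at key q.1)
def bstep (d : PySem.Dict Int (PySem.Set String)) (q : Int × List String) : PySem.Dict Int (PySem.Set String) :=
  q.2.foldl (fun d n => d.modify q.1 [] (fun s => PySem.Set.add s n)) d

-- value tracking through one istep
theorem istep_getD (ns : List String) (i : Int) (d : PySem.Dict String (PySem.Set Int)) (m : String) :
    (istep d (i, ns)).getD m [] =
      if m ∈ ns then PySem.Set.add (d.getD m []) i else d.getD m [] := by
  induction ns generalizing d with
  | nil => simp [istep]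
  | cons n ns ih =>
      simp only [istep, List.foldl_cons] at ih ⊢
      rw [ih]
      rw [PySem.Dict.getD_modify]
      by_cases hm : m ∈ ns <;> by_cases he : m = n <;> simp [hm, he]

-- inserting the value already stored at an existing key changes nothing
theorem insert_getD_self {κ ν : Type} [BEq κ] [LawfulBEq κ] (d : PySem.Dict κ ν) (k : κ) (v : ν)
    (h : d.get? k = some v) (hnd : d.keys.Nodup) : d.insert k v = d := by
  apply PySem.Dict.ext
  rw [PySem.Dict.items_insert_of_contains d v (by rw [PySem.Dict.contains_eq_isSome_get?, h]; rfl)]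
  conv_rhs => rw [← List.map_id d.items]
  apply List.map_congr_left
  intro p hp
  by_cases hk : p.1 == k
  · have hk' : p.1 = k := by simpa using hk
    have hv : d.get? p.1 = some p.2 := PySem.Dict.get?_of_mem_items d (by simpa using hp) hnd
    rw [hk', h] at hv
    have hveq : v = p.2 := (Option.some.injEq _ _).mp hv
    rw [if_pos hk, hveq, ← hk']
    rfl
  · simp [hk]

theorem keys_istep (d : PySem.Dict String (PySem.Set Int)) (q : Int × List String) :
    (istep d q).keys = PySem.Set.update d.keys q.2 := by
  unfold istep
  exact PySem.Dict.keys_foldl_modify q.2 [] (fun _ _ => fun s => PySem.Set.add s q.1) d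

-- an istep over a name list equals the istep over its set of distinct names
theorem istep_ofList (ns : List String) (i : Int) (d : PySem.Dict String (PySem.Set Int))
    (hnd : d.keys.Nodup) : istep d (i, ns) = istep d (i, PySem.Set.ofList ns) := by
  induction ns using List.reverseRecOn with
  | nil => rfl
  | append_singleton ns n ih =>
      rw [PySem.Set.ofList_append_singleton]
      by_cases hn : n ∈ ns
      · rw [PySem.Set.add_of_mem (by simpa [PySem.Set.mem_ofList] using hn), ← ih]
        have hv : (istep d (i, ns)).getD n [] = PySem.Set.add (d.getD n []) i := by
          rw [istep_getD]; simp [hn]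
        have hmem : n ∈ (istep d (i, ns)).keys := by
          rw [keys_istep]; exact (PySem.Set.mem_update _ _ _).mpr (Or.inr hn)
        have hcon : (istep d (i, ns)).contains n = true :=
          (PySem.Dict.contains_iff_mem_keys _ _).mpr hmem
        obtain ⟨v, hv'⟩ : ∃ v, (istep d (i, ns)).get? n = some v := by
          rw [PySem.Dict.contains_eq_isSome_get?] at hcon
          exact Option.isSome_iff_exists.mp hcon
        have hgd : (istep d (i, ns)).getD n [] = v :=
          PySem.Dict.getD_of_get?_eq_some _ [] hv'
        have hidem : PySem.Set.add ((istep d (i, ns)).getD n []) i = (istep d (i, ns)).getD n [] := by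
          rw [hv]
          exact PySem.Set.add_of_mem ((PySem.Set.mem_add _ _ _).mpr (Or.inr rfl))
        have hstep : istep d (i, ns ++ [n]) =
            (istep d (i, ns)).modify n [] (fun s => PySem.Set.add s i) := by
          simp only [istep, List.foldl_append, List.foldl_cons, List.foldl_nil]
        rw [hstep]
        show (istep d (i, ns)).insert n (PySem.Set.add ((istep d (i, ns)).getD n []) i) = istep d (i, ns)
        rw [hidem, hgd]
        exact insert_getD_self _ _ _ hv'
          (by rw [keys_istep]; exact PySem.Set.nodup_update _ _ hnd)
      · rw [PySem.Set.add_of_not_mem (by simpa [PySem.Set.mem_ofList] using hn)]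
        simp only [istep, List.foldl_append] at ih ⊢
        rw [ih]

-- closed form of one bstep on a nonempty name list
theorem bstep_cons (ns : List String) (n : String) (i : Int) (d : PySem.Dict Int (PySem.Set String)) :
    bstep d (i, n :: ns) = d.insert i (PySem.Set.update (d.getD i []) (n :: ns)) := by
  induction ns generalizing d n with
  | nil => rfl
  | cons n' ns ih =>
      show bstep (d.insert i (PySem.Set.add (d.getD i []) n)) (i, n' :: ns) = _
      rw [ih]
      rw [PySem.Dict.insert_insert_self, PySem.Dict.getD_insert_self]
      rfl

-- keys produced by the grouping pass come from the processed indices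
theorem keys_bstep_foldl (L : List (Int × List String)) (d : PySem.Dict Int (PySem.Set String))
    (k : Int) (h : k ∈ (L.foldl bstep d).keys) : k ∈ d.keys ∨ k ∈ L.map Prod.fst := by
  induction L generalizing d with
  | nil => exact Or.inl h
  | cons q L ih =>
      rw [List.foldl_cons] at h
      rcases ih (bstep d q) h with h' | h'
      · obtain ⟨i, ns⟩ := q
        cases ns with
        | nil => exact Or.inl h'
        | cons n ns =>
            rw [bstep_cons] at h'
            rcases (PySem.Dict.mem_keys_insert _ _ _ _).mp h' with h'' | h''
            · exact Or.inr (by simp [h''])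
            · exact Or.inl h''
      · exact Or.inr (by simp at h' ⊢; exact Or.inr h')

theorem nodup_keys_istep_foldl (L : List (Int × List String)) (d : PySem.Dict String (PySem.Set Int))
    (hnd : d.keys.Nodup) : (L.foldl istep d).keys.Nodup := by
  induction L generalizing d with
  | nil => exact hnd
  | cons q L ih =>
      rw [List.foldl_cons]
      exact ih _ (by rw [keys_istep]; exact PySem.Set.nodup_update _ _ hnd)

-- MAIN: inverting the grouped map equals the direct one-pass inversion
theorem invert_eq (L : List (Int × List String)) (hnd : (L.map Prod.fst).Nodup) :
    (L.foldl bstep PySem.Dict.empty).items.foldl istep PySem.Dict.empty =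
    L.foldl istep PySem.Dict.empty := by
  induction L using List.reverseRecOn with
  | nil => rfl
  | append_singleton L q ih =>
      rw [List.map_append, List.nodup_append] at hnd
      obtain ⟨h1, h2, h3⟩ := hnd
      have hfresh : q.1 ∉ L.map Prod.fst := fun hm => h3 q.1 hm q.1 (by simp) rfl
      rw [List.foldl_append, List.foldl_append]
      simp only [List.foldl_cons, List.foldl_nil]
      obtain ⟨i, ns⟩ := q
      cases ns with
      | nil => exact ih h1
      | cons n ns =>
          rw [bstep_cons]
          have hni : i ∉ (L.foldl bstep PySem.Dict.empty).keys := fun hm => by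
            rcases keys_bstep_foldl L _ i hm with h | h
            · simp [PySem.Dict.keys_empty] at h
            · exact hfresh (by simpa using h)
          have hnc : (L.foldl bstep PySem.Dict.empty).contains i = false := by
            by_contra hc
            exact hni ((PySem.Dict.contains_iff_mem_keys _ _).mp (by simpa using hc))
          rw [PySem.Dict.getD_of_not_contains _ _ hnc,
              PySem.Dict.items_insert_of_not_contains _ _ hnc,
              List.foldl_append, ih h1]
          simp only [List.foldl_cons, List.foldl_nil]
          rw [PySem.Set.update_nil_left,
              ← istep_ofList _ _ _ (nodup_keys_istep_foldl _ _ PySem.Dict.nodup_keys_empty)]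

-- splitting A's paired loop into its two independent components
theorem a_split (data : List (List (String × List (List (String × String))))) :
    (PySem.List.enumerate data).foldl
      (fun (st : PySem.Dict String (PySem.Set Int) × PySem.Dict Int (PySem.Set String)) p =>
        ((PySem.Dict.mk p.2).getD "categories" []).foldl
          (fun st category =>
            (st.1.modify ((PySem.Dict.mk category).getD "supercategory_name" "") []
               (fun s => PySem.Set.add s p.1),
             st.2.modify p.1 []
               (fun s => PySem.Set.add s ((PySem.Dict.mk category).getD "supercategory_name" ""))))
          st)
      (PySem.Dict.empty, PySem.Dict.empty)
    =
    (((PySem.List.enumerate data).map pvNames).foldl istep PySem.Dict.empty,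
     ((PySem.List.enumerate data).map pvNames).foldl bstep PySem.Dict.empty) := by
  rw [List.foldl_map, List.foldl_map]
  induction PySem.List.enumerate data using List.reverseRecOn with
  | nil => rfl
  | append_singleton E p ih =>
      simp only [List.foldl_append, List.foldl_cons, List.foldl_nil]
      rw [ih]
      rw [PySem.List.foldl_prod_mk
            (f := fun d category =>
              PySem.Dict.modify d ((PySem.Dict.mk category).getD "supercategory_name" "") []
                (fun s => PySem.Set.add s p.1))
            (g := fun d category =>
              PySem.Dict.modify d p.1 []
                (fun s => PySem.Set.add s ((PySem.Dict.mk category).getD "supercategory_name" "")))]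
      unfold istep bstep pvNames
      rw [List.foldl_map, List.foldl_map]

-- the two ports agree on every input
theorem ports_agree (data : List (List (String × List (List (String × String))))) :
    organize_by_supercategory data = organize_by_supercategory_alt data := by
  have hnd : (((PySem.List.enumerate data).map pvNames).map Prod.fst).Nodup := by
    rw [List.map_map]
    have he : (Prod.fst ∘ pvNames) =
        fun p : Int × List (String × List (List (String × String))) => p.1 := rfl
    rw [he, PySem.List.map_fst_enumerate]
    exact PySem.List.nodup_pyRange_one 0 _
  have hB1 : ∀ (d : PySem.Dict Int (PySem.Set String)),
      (PySem.List.enumerate data).foldl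
        (fun d p => ((PySem.Dict.mk p.2).getD "categories" []).foldl
          (fun d category =>
            d.modify p.1 []
              (fun s => PySem.Set.add s ((PySem.Dict.mk category).getD "supercategory_name" ""))) d) d
      = ((PySem.List.enumerate data).map pvNames).foldl bstep d := by
    intro d
    rw [List.foldl_map]
    unfold bstep pvNames
    simp only [List.foldl_map]
  simp only [organize_by_supercategory, organize_by_supercategory_alt]
  rw [a_split]
  dsimp only
  rw [hB1]
  have hstep : (fun (d : PySem.Dict String (PySem.Set Int)) (q : Int × PySem.Set String) =>
      q.2.foldl (fun d name => d.modify name [] (fun s => PySem.Set.add s q.1)) d) = istep := rfl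
  rw [hstep, invert_eq _ hnd]

-- ===== VERDICT (by name: the statement is the Claim_ definition above) =====
theorem organize_by_supercategory_spec : Claim_equal_organize_by_supercategory := by
  intro data _ _
  exact ports_agree data
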